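-- pv_equiv track=rewrite | github.com/chenjiashuo123/WBDC_2022_RANK8 | dataset/.ipynb_checkpoints/dataset_helper-checkpoint.py | truncate_text_v2
-- ===== SOURCE A (Python) =====
-- def truncate_text_v2(title_token, asr_token, ocr_token, token_len):
--     total_length = len(title_token) + len(asr_token) + len(ocr_token)
--     if total_length <= token_len:
--         return title_token, asr_token, ocr_token
--     else:
--         if len(title_token) >= token_len:
--             first_half_len = token_len//2
--             second_half_len = token_len-first_half_len
--             title_token = title_token[:first_half_len] + title_token[-second_half_len:]
--             return title_token, [], []
--         else:
--             ocr_asr_len = token_len - len(title_token)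
--             while len(asr_token) + len(ocr_token) > ocr_asr_len:
--                 if len(asr_token) > len(ocr_token):
--                     asr_token.pop()
--                 else:
--                     ocr_token.pop()
--             return title_token, asr_token, ocr_token
-- ===== SOURCE B (Python) =====
-- def truncate_text_v2(title_token, asr_token, ocr_token, token_len):
--     t, a, o = len(title_token), len(asr_token), len(ocr_token)
--     if t + a + o <= token_len:
--         return title_token, asr_token, ocr_token
--     if t >= token_len:
--         first_half_len = token_len // 2
--         second_half_len = token_len - first_half_len
--         return title_token[:first_half_len] + title_token[-second_half_len:], [], []
--     budget = token_len - t
--     keep_a = min(a, max(budget - o, (budget + 1) // 2))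
--     return title_token, asr_token[:keep_a], ocr_token[:budget - keep_a]
-- ===== Notes on version B (the rewrite author's own statement) =====
-- stated objective: alternative
-- what changed: The while loop that pops one token at a time from the longer of asr/ocr is replaced by a closed-form computation of the kept asr/ocr lengths (balance toward ceil(budget/2), ties kept on asr) followed by a single slice of each list; B also does not mutate its arguments.
import Mathlib
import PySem

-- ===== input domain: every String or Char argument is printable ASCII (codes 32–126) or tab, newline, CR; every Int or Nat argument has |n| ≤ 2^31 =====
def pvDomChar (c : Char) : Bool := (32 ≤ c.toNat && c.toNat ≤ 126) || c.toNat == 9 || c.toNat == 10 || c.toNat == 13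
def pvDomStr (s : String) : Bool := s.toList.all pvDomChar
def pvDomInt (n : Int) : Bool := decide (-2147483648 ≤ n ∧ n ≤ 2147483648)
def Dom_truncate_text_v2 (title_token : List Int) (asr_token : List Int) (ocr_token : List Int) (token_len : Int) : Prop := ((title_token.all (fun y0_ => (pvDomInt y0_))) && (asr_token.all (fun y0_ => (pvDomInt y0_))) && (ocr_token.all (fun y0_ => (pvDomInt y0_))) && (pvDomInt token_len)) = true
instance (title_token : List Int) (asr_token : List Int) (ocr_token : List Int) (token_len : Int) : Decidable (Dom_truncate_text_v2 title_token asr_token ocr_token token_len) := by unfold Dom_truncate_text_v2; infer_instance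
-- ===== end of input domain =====

-- B replaces A's one-pop-at-a-time while loop by closed-form kept lengths and one slice per list;
-- A mutates asr_token/ocr_token in place (pop) while B does not: the equivalence proved is about the RETURN value only.
-- ===== PORT A =====
-- Port of A. A mutates asr_token/ocr_token in place via pop(); the equivalence proved here is
-- about the RETURN value only (B does not mutate).
-- The while loop: pop from the end of the longer of asr/ocr (tie: ocr) until the sum fits.
-- The extra '0 < asr.length + ocr.length' conjunct only makes the recursion total; it is implied
-- by the loop condition whenever budget ≥ 0 (which holds on every reachable call, budget ≥ 1).
def popLoop (asr ocr : List Int) (budget : Int) : List Int × List Int :=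
  if ((asr.length : Int) + (ocr.length : Int) > budget) ∧ 0 < asr.length + ocr.length then
    if asr.length > ocr.length then popLoop asr.dropLast ocr budget
    else popLoop asr ocr.dropLast budget
  else (asr, ocr)
termination_by asr.length + ocr.length
decreasing_by
· have h1 : asr.dropLast.length = asr.length - 1 := List.length_dropLast
  omega
· have h2 : ocr.dropLast.length = ocr.length - 1 := List.length_dropLast
  omega

def truncate_text_v2 (title_token : List Int) (asr_token : List Int) (ocr_token : List Int) (token_len : Int) : List Int × List Int × List Int :=
  if ((title_token.length : Int) + asr_token.length + ocr_token.length) ≤ token_len then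
    (title_token, asr_token, ocr_token)
  else if (title_token.length : Int) ≥ token_len then
    let first_half_len := PySem.Int.floordiv token_len 2
    let second_half_len := token_len - first_half_len
    (PySem.List.slice title_token none (some first_half_len) ++
       PySem.List.slice title_token (some (-second_half_len)) none, [], [])
  else
    let ocr_asr_len := token_len - (title_token.length : Int)
    let p := popLoop asr_token ocr_token ocr_asr_len
    (title_token, p.1, p.2)

-- ===== PORT B =====
-- Port of B: closed-form kept lengths, one slice per list.
def truncate_text_v2_alt (title_token : List Int) (asr_token : List Int) (ocr_token : List Int) (token_len : Int) : List Int × List Int × List Int :=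
  let t : Int := title_token.length
  let a : Int := asr_token.length
  let o : Int := ocr_token.length
  if t + a + o ≤ token_len then (title_token, asr_token, ocr_token)
  else if t ≥ token_len then
    let first_half_len := PySem.Int.floordiv token_len 2
    let second_half_len := token_len - first_half_len
    (PySem.List.slice title_token none (some first_half_len) ++
       PySem.List.slice title_token (some (-second_half_len)) none, [], [])
  else
    let budget := token_len - t
    let keep_a := min a (max (budget - o) (PySem.Int.floordiv (budget + 1) 2))
    (title_token, PySem.List.slice asr_token none (some keep_a),
       PySem.List.slice ocr_token none (some (budget - keep_a)))

-- ===== PRECONDITION & SPEC =====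
def Spec_truncate_text_v2 (title_token : List Int) (asr_token : List Int) (ocr_token : List Int) (token_len : Int) (out : List Int × List Int × List Int) : Prop := out = truncate_text_v2_alt title_token asr_token ocr_token token_len
instance (title_token : List Int) (asr_token : List Int) (ocr_token : List Int) (token_len : Int) (out : List Int × List Int × List Int) : Decidable (Spec_truncate_text_v2 title_token asr_token ocr_token token_len out) := by unfold Spec_truncate_text_v2; infer_instance

-- ===== CLAIM (what is proved, stated in full; the proofs are below) =====
def Claim_equal_truncate_text_v2 : Prop := ∀ (title_token : List Int) (asr_token : List Int) (ocr_token : List Int) (token_len : Int), Dom_truncate_text_v2 title_token asr_token ocr_token token_len → Spec_truncate_text_v2 title_token asr_token ocr_token token_len (truncate_text_v2 title_token asr_token ocr_token token_len)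

-- ===== LEMMAS AND PROOFS =====

-- ===== VERDICT (by name: the statement is the Claim_ definition above) =====
-- kept asr length for the pop loop with budget b: balance toward ceil((b+1)/2)... (proof helper)
def keepA (a o b : Int) : Int := min a (max (b - o) (PySem.Int.floordiv (b + 1) 2))

theorem popLoop_eq (n : Nat) (asr ocr : List Int) (b : Int) (hb : 1 ≤ b)
    (hn : asr.length + ocr.length ≤ n) :
    popLoop asr ocr b =
      if (asr.length : Int) + (ocr.length : Int) ≤ b then (asr, ocr)
      else (asr.take (keepA asr.length ocr.length b).toNat,
            ocr.take (b - keepA asr.length ocr.length b).toNat) := by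
  induction n generalizing asr ocr with
  | zero =>
    have ha : asr.length = 0 := by omega
    have ho : ocr.length = 0 := by omega
    rw [popLoop]
    rw [if_neg (by omega), if_pos (by push_cast [ha, ho]; omega)]
  | succ n ih =>
    have hc : PySem.Int.floordiv (b + 1) 2 = (b + 1) / 2 :=
      PySem.Int.floordiv_eq_ediv_of_pos (by omega)
    by_cases hle : (asr.length : Int) + (ocr.length : Int) ≤ b
    · rw [popLoop, if_neg (by omega), if_pos hle]
    · rw [if_neg hle, popLoop, if_pos ⟨by omega, by omega⟩]
      by_cases hao : asr.length > ocr.length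
      · rw [if_pos hao]
        have hds : asr.dropLast.length = asr.length - 1 := List.length_dropLast
        have hds' : (asr.dropLast.length : Int) = (asr.length : Int) - 1 := by omega
        rw [ih asr.dropLast ocr (by omega), hds']
        by_cases h2 : ((asr.length : Int) - 1) + (ocr.length : Int) ≤ b
        · rw [if_pos h2]
          have hkv : keepA asr.length ocr.length b = (asr.length : Int) - 1 := by
            unfold keepA; rw [hc]; omega
          rw [hkv]
          have e1 : ((asr.length : Int) - 1).toNat = asr.length - 1 := by omega
          have e2 : (b - ((asr.length : Int) - 1)).toNat = ocr.length := by omega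
          rw [e1, e2, List.take_length, List.dropLast_eq_take]
        · rw [if_neg h2]
          have hkeq : keepA ((asr.length : Int) - 1) ocr.length b
              = keepA asr.length ocr.length b := by
            unfold keepA; rw [hc]; omega
          rw [hkeq]
          have hklt : (keepA asr.length ocr.length b).toNat ≤ asr.length - 1 := by
            unfold keepA; rw [hc]; omega
          rw [List.dropLast_eq_take, List.take_take]
          congr 2
          omega
      · rw [if_neg hao]
        have hds : ocr.dropLast.length = ocr.length - 1 := List.length_dropLast
        have hone : 1 ≤ ocr.length := by omega
        have hds' : (ocr.dropLast.length : Int) = (ocr.length : Int) - 1 := by omega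
        rw [ih asr ocr.dropLast (by omega), hds']
        by_cases h2 : (asr.length : Int) + ((ocr.length : Int) - 1) ≤ b
        · rw [if_pos h2]
          have hkv : keepA asr.length ocr.length b = (asr.length : Int) := by
            unfold keepA; rw [hc]; omega
          rw [hkv]
          have e1 : ((asr.length : Int)).toNat = asr.length := by omega
          have e2 : (b - (asr.length : Int)).toNat = ocr.length - 1 := by omega
          rw [e1, e2, List.take_length, List.dropLast_eq_take]
        · rw [if_neg h2]
          have hkeq : keepA (asr.length : Int) ((ocr.length : Int) - 1) b
              = keepA asr.length ocr.length b := by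
            unfold keepA; rw [hc]; omega
          rw [hkeq]
          have hklt : (b - keepA asr.length ocr.length b).toNat ≤ ocr.length - 1 := by
            unfold keepA; rw [hc]; omega
          rw [List.dropLast_eq_take, List.take_take]
          congr 2
          omega

theorem truncate_text_v2_spec : Claim_equal_truncate_text_v2 := by
  intro title asr ocr k _
  unfold Spec_truncate_text_v2 truncate_text_v2 truncate_text_v2_alt
  by_cases h1 : ((title.length : Int) + asr.length + ocr.length) ≤ k
  · simp only [if_pos h1]
  · simp only [if_neg h1]
    by_cases h2 : (title.length : Int) ≥ k
    · simp only [if_pos h2]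
    · simp only [if_neg h2]
      have hb : 1 ≤ k - (title.length : Int) := by omega
      have hc : PySem.Int.floordiv (k - (title.length : Int) + 1) 2
          = (k - (title.length : Int) + 1) / 2 :=
        PySem.Int.floordiv_eq_ediv_of_pos (by omega)
      rw [popLoop_eq (asr.length + ocr.length) asr ocr _ hb (le_refl _)]
      rw [if_neg (by omega)]
      have hka : 0 ≤ keepA asr.length ocr.length (k - (title.length : Int)) := by
        unfold keepA; rw [hc]; omega
      have hko : 0 ≤ (k - (title.length : Int)) - keepA asr.length ocr.length (k - (title.length : Int)) := by
        unfold keepA; rw [hc]; omega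
      unfold keepA at hka hko ⊢
      rw [PySem.List.slice_to _ hka, PySem.List.slice_to _ hko]
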